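-- pv_equiv track=rewrite | github.com/Logesh-Murugan/AI-Powered-Interview-Coach | backend/app/utils/text_extraction.py | get_text_statistics
-- ===== SOURCE A (Python) =====
-- def get_text_statistics(text: str) -> dict:
--     """
--     Get statistics about extracted text.
--
--     Args:
--         text: Extracted text
--
--     Returns:
--         Dictionary with statistics
--     """
--     if not text:
--         return {
--             'character_count': 0,
--             'word_count': 0,
--             'line_count': 0,
--             'paragraph_count': 0
--         }
--
--     words = text.split()
--     lines = text.split('\n')
--     paragraphs = [p for p in text.split('\n\n') if p.strip()]
--
--     return {
--         'character_count': len(text),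
--         'word_count': len(words),
--         'line_count': len(lines),
--         'paragraph_count': len(paragraphs)
--     }
-- ===== SOURCE B (Python) =====
-- def get_text_statistics(text: str) -> dict:
--     """Single-pass re-implementation: one scan over the characters with counters
--     instead of building the three split lists."""
--     if not text:
--         return {
--             'character_count': 0,
--             'word_count': 0,
--             'line_count': 0,
--             'paragraph_count': 0
--         }
--
--     words = 0
--     lines = 1
--     paragraphs = 0
--     in_word = False
--     seen_nonspace = False  # non-whitespace seen since the last '\n\n' boundary
--     i = 0
--     n = len(text)
--     while i < n:
--         c = text[i]
--         if c == '\n' and i + 1 < n and text[i + 1] == '\n':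
--             # non-overlapping '\n\n' boundary, as in text.split('\n\n')
--             lines += 2
--             if seen_nonspace:
--                 paragraphs += 1
--             seen_nonspace = False
--             in_word = False
--             i += 2
--             continue
--         if c == '\n':
--             lines += 1
--         if c.isspace():
--             in_word = False
--         else:
--             if not in_word:
--                 words += 1
--             in_word = True
--             seen_nonspace = True
--         i += 1
--     if seen_nonspace:
--         paragraphs += 1
--
--     return {
--         'character_count': n,
--         'word_count': words,
--         'line_count': lines,
--         'paragraph_count': paragraphs
--     }
-- ===== Notes on version B (the rewrite author's own statement) =====
-- stated objective: alternative
-- what changed: Replaces the three whitespace/newline/blank-line split list constructions plus a strip()-filter with a single left-to-right scan over the characters that maintains word, line and paragraph counters (in-word flag, newline counter, non-overlapping blank-line boundary detection with a seen-non-whitespace flag), allocating no intermediate lists; it trades CPython's C-level split loops for one interpreted pass.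
import Mathlib
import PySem

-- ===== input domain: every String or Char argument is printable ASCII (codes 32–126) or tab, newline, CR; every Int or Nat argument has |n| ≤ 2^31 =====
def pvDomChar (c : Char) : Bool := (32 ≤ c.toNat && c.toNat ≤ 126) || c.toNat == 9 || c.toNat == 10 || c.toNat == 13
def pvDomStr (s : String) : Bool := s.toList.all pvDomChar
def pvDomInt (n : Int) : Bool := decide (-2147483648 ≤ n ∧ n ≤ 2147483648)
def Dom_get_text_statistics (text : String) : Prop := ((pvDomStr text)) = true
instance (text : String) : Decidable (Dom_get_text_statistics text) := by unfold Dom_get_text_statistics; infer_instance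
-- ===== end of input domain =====

-- B replaces A's three split-based passes by one character scan with counters (alternative decomposition, no intermediate lists).

-- ===== PORT A =====
def get_text_statistics (text : String) : List (String × Int) :=
  if text = "" then
    [("character_count", 0), ("word_count", 0), ("line_count", 0), ("paragraph_count", 0)]
  else
    let words := PySem.Chars.split₀ text.toList
    let lines := PySem.Chars.splitOn text.toList ['\n']
    let paragraphs := (PySem.Chars.splitOn text.toList ['\n', '\n']).filter
      (fun p => !(PySem.Chars.strip p).isEmpty)
    [("character_count", PySem.Str.len text),
     ("word_count", PySem.List.len words),
     ("line_count", PySem.List.len lines),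
     ("paragraph_count", PySem.List.len paragraphs)]

-- ===== PORT B =====
-- one scan: state (in_word, seen_nonspace) and counters (words, lines, paragraphs);
-- a '\n\n' pair is consumed in one step (non-overlapping boundary)
def bScan : List Char → Bool → Bool → Int → Int → Int → Int × Int × Int
  | '\n' :: '\n' :: rest, _, seen, w, l, p =>
      bScan rest false false w (l + 2) (p + if seen then 1 else 0)
  | c :: rest, inW, seen, w, l, p =>
      let l' := if c = '\n' then l + 1 else l
      if PySem.Chars.isspace c then bScan rest false seen w l' p
      else bScan rest true true (w + if inW then 0 else 1) l' p
  | [], _, seen, w, l, p => (w, l, p + if seen then 1 else 0)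

def get_text_statistics_alt (text : String) : List (String × Int) :=
  if text = "" then
    [("character_count", 0), ("word_count", 0), ("line_count", 0), ("paragraph_count", 0)]
  else
    let (w, l, p) := bScan text.toList false false 0 1 0
    [("character_count", PySem.Str.len text),
     ("word_count", w),
     ("line_count", l),
     ("paragraph_count", p)]

-- ===== PRECONDITION & SPEC =====
def Spec_get_text_statistics (text : String) (out : List (String × Int)) : Prop := out = get_text_statistics_alt text
instance (text : String) (out : List (String × Int)) : Decidable (Spec_get_text_statistics text out) := by unfold Spec_get_text_statistics; infer_instance

-- ===== CLAIM (what is proved, stated in full; the proofs are below) =====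
def Claim_equal_get_text_statistics : Prop := ∀ (text : String), Dom_get_text_statistics text → Spec_get_text_statistics text (get_text_statistics text)

-- ===== LEMMAS AND PROOFS =====

-- spec counters (proof-only): words of a suffix given the in-word flag, paragraphs given the seen-flag
def specW : List Char → Bool → Nat
  | [], _ => 0
  | c :: r, inW =>
      if PySem.Chars.isspace c then specW r false
      else (if inW then 0 else 1) + specW r true

def specP : List Char → Bool → Nat
  | '\n' :: '\n' :: r, seen => (if seen then 1 else 0) + specP r false
  | c :: r, seen => specP r (seen || !PySem.Chars.isspace c)
  | [], seen => if seen then 1 else 0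

theorem specP_cons (c : Char) (rest : List Char) (seen : Bool)
    (hne : ∀ r, c = '\n' → rest = '\n' :: r → False) :
    specP (c :: rest) seen = specP rest (seen || !PySem.Chars.isspace c) := by
  rcases rest with _ | ⟨c2, r2⟩
  · rw [specP.eq_def]; simp [specP]
  · by_cases hc : c = '\n'
    · by_cases hc2 : c2 = '\n'
      · exact ((hne r2 hc (by rw [hc2]))).elim
      · subst hc; rw [specP.eq_def]; simp
    · rw [specP.eq_def]; simp


theorem bScan_eq (cs : List Char) (inW seen : Bool) (w l p : Int) :
    bScan cs inW seen w l p =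
      (w + specW cs inW, l + (cs.count '\n' : Int), p + specP cs seen) := by
  induction cs, inW, seen, w, l, p using bScan.induct with
  | case1 rest x seen w l p ih =>
      have hsp : PySem.Chars.isspace '\n' = true := by decide
      rw [show bScan ('\n' :: '\n' :: rest) x seen w l p
            = bScan rest false false w (l + 2) (p + if seen then 1 else 0) from rfl, ih,
          show specP ('\n' :: '\n' :: rest) seen
            = (if seen then 1 else 0) + specP rest false from rfl]
      simp only [specW, hsp, if_true, List.count_cons]
      refine Prod.ext rfl (Prod.ext ?_ ?_) <;> simp <;> cases seen <;> push_cast <;> omega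
  | case2 c rest inW seen w l p hne lv hs ih =>
      simp only [lv] at ih
      rw [specP_cons c rest seen hne, show (seen || !PySem.Chars.isspace c) = seen by simp [hs]]
      by_cases hc : c = '\n'
      · subst hc
        rw [if_pos rfl] at ih
        simp only [bScan, hs, if_true, specW, List.count_cons]
        rw [ih]
        refine Prod.ext rfl (Prod.ext ?_ rfl)
        simp; omega
      · rw [if_neg hc] at ih
        simp only [bScan, hs, if_true, specW, List.count_cons, if_neg hc]
        rw [ih]
        refine Prod.ext rfl (Prod.ext ?_ rfl)
        simp [hc]
  | case3 c rest inW seen w l p hne lv hs ih =>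
      have hs' : PySem.Chars.isspace c = false := by simpa using hs
      have hc : c ≠ '\n' := by intro h; subst h; exact hs (by decide)
      simp only [lv, if_neg hc] at ih
      rw [specP_cons c rest seen hne, show (seen || !PySem.Chars.isspace c) = true by simp [hs']]
      simp only [bScan, hs', specW, List.count_cons, Bool.false_eq_true, if_false, if_neg hc]
      rw [ih]
      refine Prod.ext ?_ (Prod.ext ?_ rfl)
      · simp; cases inW <;> push_cast <;> omega
      · simp [hc]
  | case4 x seen w l p => simp [bScan, specW, specP]

theorem strip_isEmpty_iff (p : List Char) :
    (PySem.Chars.strip p).isEmpty = !p.any (fun c => !PySem.Chars.isspace c) := by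
  rcases h : p.any (fun c => !PySem.Chars.isspace c) with _ | _
  · have hall : ∀ c ∈ p, PySem.Chars.isspace c = true := by
      intro c hc
      simpa using List.any_eq_false.mp h c hc
    simp only [PySem.Chars.strip, PySem.Chars.rstrip, PySem.Chars.lstrip]
    rw [List.dropWhile_eq_nil_iff.mpr hall]
    simp
  · simp only [Bool.not_true, List.isEmpty_eq_false_iff, ne_eq]
    simp only [PySem.Chars.strip, PySem.Chars.rstrip, PySem.Chars.lstrip]
    intro hcontra
    have h2 : ((p.dropWhile PySem.Chars.isspace).reverse.dropWhile PySem.Chars.isspace) = [] := by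
      simpa using hcontra
    have hall3 : ∀ c ∈ p.dropWhile PySem.Chars.isspace, PySem.Chars.isspace c = true := by
      intro c hc
      exact List.dropWhile_eq_nil_iff.mp h2 c (List.mem_reverse.mpr hc)
    obtain ⟨c, hc, hcs⟩ := List.any_eq_true.mp h
    have hcs' : PySem.Chars.isspace c = false := by simpa using hcs
    rw [← List.takeWhile_append_dropWhile (p := PySem.Chars.isspace) (l := p)] at hc
    rcases List.mem_append.mp hc with h4 | h4
    · exact absurd (List.mem_takeWhile_imp h4) (by simp [hcs'])
    · exact absurd (hall3 c h4) (by simp [hcs'])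

theorem split₀_go_len (l : List Char) (cur : List Char) (acc : List (List Char)) :
    (PySem.Chars.split₀.go l cur acc).length =
      acc.length + specW l (!cur.isEmpty) + (if cur.isEmpty then 0 else 1) := by
  induction l generalizing cur acc with
  | nil =>
      by_cases h : cur.isEmpty <;> simp [PySem.Chars.split₀.go, specW, h]
  | cons c rest ih =>
      rw [PySem.Chars.split₀.go]
      by_cases hs : PySem.Chars.isspace c = true
      · rw [if_pos hs]
        by_cases h : cur.isEmpty = true
        · rw [if_pos h, ih]
          simp [specW, hs, h]
        · rw [if_neg h, ih]
          simp only [Bool.not_eq_true] at h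
          simp [specW, hs, h]
          omega
      · rw [if_neg hs, ih]
        have hs' : PySem.Chars.isspace c = false := by simpa using hs
        by_cases h : cur.isEmpty = true
        · simp [specW, hs', h]
          omega
        · simp only [Bool.not_eq_true] at h
          simp [specW, hs', h]

theorem split₀_len (cs : List Char) :
    (PySem.Chars.split₀ cs).length = specW cs false := by
  simpa [PySem.Chars.split₀] using split₀_go_len cs [] []

theorem splitOn_nl_go_len (l : List Char) (fuel : Nat) (cur : List Char)
    (acc : List (List Char)) (h : l.length < fuel) :
    (PySem.Chars.splitOn.go ['\n'] fuel l cur acc).length =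
      acc.length + l.count '\n' + 1 := by
  induction l generalizing fuel cur acc with
  | nil =>
      rcases fuel with _ | f
      · omega
      · simp [PySem.Chars.splitOn.go]
  | cons c rest ih =>
      rcases fuel with _ | f
      · omega
      rw [PySem.Chars.splitOn.go]
      by_cases hc : c = '\n'
      · subst hc
        rw [if_pos (by simp [List.isPrefixOf])]
        simp only [List.length_cons, List.length_nil, List.drop_succ_cons, List.drop_zero]
        rw [ih f [] _ (by simpa using Nat.lt_of_succ_lt_succ h)]
        simp
        omega
      · rw [if_neg (by simp [List.isPrefixOf]; exact fun h => hc h.symm)]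
        rw [ih f _ _ (by simpa using Nat.lt_of_succ_lt_succ h)]
        simp [hc]

theorem splitOn_nl_len (cs : List Char) :
    (PySem.Chars.splitOn cs ['\n']).length = cs.count '\n' + 1 := by
  simpa [PySem.Chars.splitOn] using splitOn_nl_go_len cs (cs.length + 1) [] [] (by omega)

theorem splitOn_nn_go_countP (fuel : Nat) (l : List Char) (cur : List Char)
    (acc : List (List Char)) (h : l.length < fuel) :
    ((PySem.Chars.splitOn.go ['\n', '\n'] fuel l cur acc).countP
        (fun p => p.any (fun c => !PySem.Chars.isspace c))) =
      acc.countP (fun p => p.any (fun c => !PySem.Chars.isspace c)) +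
        specP l (cur.any (fun c => !PySem.Chars.isspace c)) := by
  induction fuel using Nat.strong_induction_on generalizing l cur acc with
  | _ f ih =>
    rcases f with _ | f
    · omega
    rcases l with _ | ⟨c, rest⟩
    · rw [PySem.Chars.splitOn.go]
      simp [specP, List.countP_cons, List.countP_reverse, List.any_reverse]
      cases cur.any (fun c => !PySem.Chars.isspace c) <;> simp
    · rw [PySem.Chars.splitOn.go]
      by_cases hp : List.isPrefixOf ['\n', '\n'] (c :: rest) = true
      · rw [if_pos hp]
        have hshape : c = '\n' ∧ ∃ rest2, rest = '\n' :: rest2 := by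
          rcases rest with _ | ⟨c2, r2⟩
          · simp [List.isPrefixOf] at hp
          · simp [List.isPrefixOf] at hp
            exact ⟨hp.1.symm, r2, by rw [← hp.2]⟩
        obtain ⟨hc, rest2, hr⟩ := hshape
        subst hc; subst hr
        have hlen : rest2.length < f := by simp at h; omega
        simp only [List.length_cons, List.length_nil, List.drop_succ_cons, List.drop_zero]
        rw [ih f (by omega) _ _ _ hlen]
        rw [show specP ('\n' :: '\n' :: rest2) (cur.any fun c => !PySem.Chars.isspace c)
              = (if cur.any (fun c => !PySem.Chars.isspace c) then 1 else 0) + specP rest2 false from rfl]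
        simp only [List.countP_cons, List.any_reverse, List.any_nil]
        by_cases hseen : cur.any (fun c => !PySem.Chars.isspace c) = true <;>
          simp [hseen]
        omega
      · rw [if_neg hp]
        rw [ih f (by omega) _ _ _ (by simpa using Nat.lt_of_succ_lt_succ h)]
        have hne : ∀ r2, c = '\n' → rest = '\n' :: r2 → False := by
          intro r2 hc hr
          subst hc; subst hr
          simp [List.isPrefixOf] at hp
        rw [specP_cons c rest _ hne]
        have : ((c :: cur).any (fun c => !PySem.Chars.isspace c))
            = ((cur.any fun c => !PySem.Chars.isspace c) || !PySem.Chars.isspace c) := by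
          simp [Bool.or_comm]
        rw [this]

theorem splitOn_nn_countP (cs : List Char) :
    ((PySem.Chars.splitOn cs ['\n', '\n']).countP
        (fun p => p.any (fun c => !PySem.Chars.isspace c))) = specP cs false := by
  simpa [PySem.Chars.splitOn] using splitOn_nn_go_countP (cs.length + 1) cs [] [] (by omega)

theorem paragraphs_len (cs : List Char) :
    ((PySem.Chars.splitOn cs ['\n', '\n']).filter
        (fun p => !(PySem.Chars.strip p).isEmpty)).length = specP cs false := by
  rw [← List.countP_eq_length_filter, ← splitOn_nn_countP cs]
  apply List.countP_congr
  intro p _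
  rw [strip_isEmpty_iff]
  simp

-- ===== VERDICT (by name: the statement is the Claim_ definition above) =====
theorem get_text_statistics_spec : Claim_equal_get_text_statistics := by
  intro text _
  unfold Spec_get_text_statistics get_text_statistics get_text_statistics_alt
  by_cases h : text = ""
  · simp [h]
  · rw [if_neg h, if_neg h, bScan_eq]
    simp only [PySem.List.len_eq]
    rw [split₀_len, splitOn_nl_len, paragraphs_len]
    push_cast
    norm_num
    omega
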